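-- pv_equiv track=rewrite | github.com/daniel-reich/ubiquitous-fiesta | 8qD23E6XRMaWhyJ5z_22.py | happiness_number
-- ===== SOURCE A (Python) =====
-- def happiness_number(s):
--   a = 0
--   b = 2
--   suma = 0
--   for i in range(len(s)-1):
--     if ':)' == s[a:b]:
--       suma +=1
--     elif ':('  == s[a:b]:
--       suma -= 1
--     elif '(:'  == s[a:b]:
--       suma += 1
--     elif '):'  == s[a:b]:
--       suma -= 1
--     a += 1
--     b += 1
--   return suma
-- ===== SOURCE B (Python) =====
-- def happiness_number(s):
--   return s.count(':)') + s.count('(:') - s.count(':(') - s.count('):')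
-- ===== Notes on version B (the rewrite author's own statement) =====
-- stated objective: faster
-- what changed: Replaces the index-tracking sliding-window loop with an arithmetic combination of four str.count library scans (safe because each 2-char pattern has distinct characters, so counts cannot self-overlap, and the patterns are pairwise distinct).
import Mathlib
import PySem

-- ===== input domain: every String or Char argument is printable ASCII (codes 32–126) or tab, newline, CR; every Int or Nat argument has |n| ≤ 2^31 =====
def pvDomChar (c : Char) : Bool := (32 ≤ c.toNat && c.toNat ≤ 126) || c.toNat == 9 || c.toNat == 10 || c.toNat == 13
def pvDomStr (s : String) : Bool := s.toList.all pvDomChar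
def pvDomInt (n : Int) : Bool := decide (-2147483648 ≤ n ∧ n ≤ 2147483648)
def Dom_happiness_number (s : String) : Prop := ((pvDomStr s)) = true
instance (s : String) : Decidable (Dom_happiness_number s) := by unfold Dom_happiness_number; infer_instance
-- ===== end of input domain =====

-- B replaces A's index-tracking sliding-window loop by an arithmetic combination of four substring counts; proved equal on all strings.


-- ===== PORT A =====
-- literal transliteration of A: a = 0; b = 2; suma = 0; for i in range(len(s)-1): compare s[a:b] to the
-- four emoticons in A's branch order, then a += 1; b += 1; return suma
def happiness_number (s : String) : Int :=
  let cs := s.toList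
  let st :=
    (PySem.List.pyRange 0 ((cs.length : Int) - 1) 1).foldl
      (fun (st : Int × Int × Int) _i =>
        let a := st.1
        let b := st.2.1
        let suma := st.2.2
        let w := PySem.List.slice cs (some a) (some b)
        let suma :=
          if w = [':', ')'] then suma + 1
          else if w = [':', '('] then suma - 1
          else if w = ['(', ':'] then suma + 1
          else if w = [')', ':'] then suma - 1
          else suma
        (a + 1, b + 1, suma))
      (0, 2, 0)
  st.2.2

-- ===== PORT B =====
-- literal transliteration of B: s.count(':)') + s.count('(:') - s.count(':(') - s.count('):')
def happiness_number_alt (s : String) : Int :=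
  (PySem.Str.count s ":)" : Int) + (PySem.Str.count s "(:" : Int)
    - (PySem.Str.count s ":(" : Int) - (PySem.Str.count s "):" : Int)

-- ===== PRECONDITION & SPEC =====
def Spec_happiness_number (s : String) (out : Int) : Prop := out = happiness_number_alt s
instance (s : String) (out : Int) : Decidable (Spec_happiness_number s out) := by unfold Spec_happiness_number; infer_instance

-- ===== CLAIM (what is proved, stated in full; the proofs are below) =====
def Claim_equal_happiness_number : Prop := ∀ (s : String), Dom_happiness_number s → Spec_happiness_number s (happiness_number s)

-- ===== LEMMAS AND PROOFS =====

-- score of one two-char window, in A's branch order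
def pvScore (w : List Char) : Int :=
  if w = [':', ')'] then 1
  else if w = [':', '('] then -1
  else if w = ['(', ':'] then 1
  else if w = [')', ':'] then -1
  else 0

-- sum of pvScore over the adjacent windows of a list
def pvPairSum : List Char → Int
  | x :: y :: r => pvScore [x, y] + pvPairSum (y :: r)
  | _ => 0

-- number of adjacent positions matching the 2-char pattern (c, d)
def pvPairCount (c d : Char) : List Char → Nat
  | x :: y :: r => (if x = c ∧ y = d then 1 else 0) + pvPairCount c d (y :: r)
  | _ => 0

theorem pvPairCount_cons_ne (c d y : Char) (r : List Char) (hyc : y ≠ c) :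
    pvPairCount c d (y :: r) = pvPairCount c d r := by
  cases r with
  | nil => simp [pvPairCount]
  | cons z r' => simp [pvPairCount, hyc]

-- Python's non-overlapping s.count for a 2-char pattern with distinct characters
-- equals the per-position tally (no self-overlap is possible).
theorem pvCountGo_eq (c d : Char) (hcd : c ≠ d) :
    ∀ (fuel : Nat) (l : List Char) (acc : Nat), l.length ≤ fuel →
      PySem.Chars.count.go [c, d] fuel l acc = acc + pvPairCount c d l := by
  intro fuel
  induction fuel with
  | zero =>
    intro l acc hl
    have : l = [] := by cases l <;> simp_all
    subst this
    rw [PySem.Chars.count.go]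
    simp [pvPairCount]
  | succ fuel ih =>
    intro l acc hl
    match l with
    | [] =>
      rw [PySem.Chars.count.go]
      simp [pvPairCount]
      omega
    | [x] =>
      rw [PySem.Chars.count.go]
      have hpre : [c, d].isPrefixOf [x] = false := by
        simp [List.isPrefixOf]
      rw [hpre]
      simp only [Bool.false_eq_true, if_false]
      rw [ih [] acc (by simp)]
      simp [pvPairCount]
    | x :: y :: r =>
      rw [PySem.Chars.count.go]
      by_cases hpre : [c, d].isPrefixOf (x :: y :: r) = true
      · rw [if_pos hpre]
        have hx : c = x ∧ d = y := by simpa [List.isPrefixOf] using hpre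
        obtain ⟨hc, hd⟩ := hx
        subst hc
        subst hd
        have hlen : r.length ≤ fuel := by simp at hl; omega
        rw [show List.drop [c, d].length (c :: d :: r) = r from rfl]
        rw [ih r (acc + 1) hlen]
        have hpc : pvPairCount c d (c :: d :: r) = 1 + pvPairCount c d r := by
          simp [pvPairCount, pvPairCount_cons_ne c d d r (Ne.symm hcd)]
        rw [hpc]
        omega
      · rw [if_neg hpre]
        have hxy : ¬ (x = c ∧ y = d) := by
          intro h
          exact hpre (by simp [List.isPrefixOf, h.1, h.2])
        have hlen : (y :: r).length ≤ fuel := by simp at hl ⊢; omega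
        rw [ih (y :: r) acc hlen]
        simp [pvPairCount, hxy]

theorem pvCount_eq (c d : Char) (hcd : c ≠ d) (cs : List Char) :
    PySem.Chars.count cs [c, d] = pvPairCount c d cs := by
  rw [PySem.Chars.count]
  simp only [List.isEmpty_cons, Bool.false_eq_true, if_false]
  simpa using pvCountGo_eq c d hcd cs.length cs 0 le_rfl

theorem pvScore_eq (x y : Char) :
    pvScore [x, y] = (if x = ':' ∧ y = ')' then (1 : Int) else 0)
      + (if x = '(' ∧ y = ':' then 1 else 0)
      - (if x = ':' ∧ y = '(' then 1 else 0)
      - (if x = ')' ∧ y = ':' then 1 else 0) := by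
  simp only [pvScore, List.cons.injEq, and_true]
  split_ifs <;> simp_all

theorem pvPairSum_eq (cs : List Char) :
    pvPairSum cs =
      (pvPairCount ':' ')' cs : Int) + (pvPairCount '(' ':' cs : Int)
        - (pvPairCount ':' '(' cs : Int) - (pvPairCount ')' ':' cs : Int) := by
  induction cs with
  | nil => simp [pvPairSum, pvPairCount]
  | cons x t ih =>
    cases t with
    | nil => simp [pvPairSum, pvPairCount]
    | cons y r =>
      simp only [pvPairSum, pvPairCount, ih, pvScore_eq x y]
      push_cast
      ring

-- the loop body of A, one step, over the full character list
def pvStep (cs : List Char) (st : Int × Int × Int) : Int × Int × Int :=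
  let a := st.1
  let b := st.2.1
  let suma := st.2.2
  let w := PySem.List.slice cs (some a) (some b)
  let suma :=
    if w = [':', ')'] then suma + 1
    else if w = [':', '('] then suma - 1
    else if w = ['(', ':'] then suma + 1
    else if w = [')', ':'] then suma - 1
    else suma
  (a + 1, b + 1, suma)

theorem pvStep_eq (cs : List Char) (k : Nat) (acc : Int) (x y : Char) (r : List Char)
    (hdrop : cs.drop k = x :: y :: r) :
    pvStep cs ((k : Int), (k : Int) + 2, acc)
      = (((k : Int) + 1), ((k : Int) + 2 + 1), acc + pvScore [x, y]) := by
  have hb : (k : Int) + 2 = ((k + 2 : Nat) : Int) := by push_cast; ring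
  have hw : PySem.List.slice cs (some (k : Int)) (some ((k : Int) + 2)) = [x, y] := by
    rw [hb, PySem.List.slice_natCast]
    rw [hdrop]
    simp
  simp only [pvStep, hw, pvScore]
  split_ifs <;> simp_all <;> ring

theorem pvLoop_eq (cs : List Char) :
    ∀ (l : List Int) (t : List Char) (k : Nat) (acc : Int),
      cs.drop k = t → l.length = t.length - 1 →
      (l.foldl (fun st _ => pvStep cs st) ((k : Int), (k : Int) + 2, acc)).2.2
        = acc + pvPairSum t := by
  intro l
  induction l with
  | nil =>
    intro t k acc _ hlen
    match t with
    | [] => simp [pvPairSum]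
    | [x] => simp [pvPairSum]
    | x :: y :: r => simp at hlen
  | cons i l' ih =>
    intro t k acc hdrop hlen
    match t with
    | [] => simp at hlen
    | [x] => simp at hlen
    | x :: y :: r =>
      simp only [List.foldl_cons]
      rw [pvStep_eq cs k acc x y r hdrop]
      have h1 : ((k : Int) + 1) = ((k + 1 : Nat) : Int) := by push_cast; ring
      have h2 : ((k : Int) + 2 + 1) = (((k + 1 : Nat) : Int)) + 2 := by push_cast; ring
      rw [h1, h2]
      have hdrop' : cs.drop (k + 1) = y :: r := by
        rw [← List.drop_drop, hdrop]
        simp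
      have hlen' : l'.length = (y :: r).length - 1 := by simp at hlen ⊢; omega
      rw [ih (y :: r) (k + 1) (acc + pvScore [x, y]) hdrop' hlen']
      simp [pvPairSum]
      ring

theorem pvA_eq (s : String) : happiness_number s = pvPairSum s.toList := by
  unfold happiness_number
  simp only []
  have hfn : (fun (st : Int × Int × Int) (_i : Int) =>
        let a := st.1
        let b := st.2.1
        let suma := st.2.2
        let w := PySem.List.slice s.toList (some a) (some b)
        let suma :=
          if w = [':', ')'] then suma + 1
          else if w = [':', '('] then suma - 1
          else if w = ['(', ':'] then suma + 1
          else if w = [')', ':'] then suma - 1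
          else suma
        (a + 1, b + 1, suma))
      = (fun (st : Int × Int × Int) (_ : Int) => pvStep s.toList st) := rfl
  rw [hfn]
  have h0 : ((0 : Int), (2 : Int), (0 : Int)) = (((0 : Nat) : Int), ((0 : Nat) : Int) + 2, (0 : Int)) := by
    norm_num
  rw [h0]
  rw [pvLoop_eq s.toList _ s.toList 0 0 (by simp) ?hlen]
  · simp
  case hlen =>
    rcases hn : s.toList.length with _ | m
    · decide
    · have hcast : ((m + 1 : Nat) : Int) - 1 = (m : Int) := by push_cast; ring
      rw [hcast, PySem.List.pyRange_zero_natCast]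
      simp

-- ===== VERDICT (by name: the statement is the Claim_ definition above) =====
theorem happiness_number_spec : Claim_equal_happiness_number := by
  intro s _
  unfold Spec_happiness_number happiness_number_alt
  rw [pvA_eq, pvPairSum_eq]
  rw [PySem.Str.count_eq s ":)", PySem.Str.count_eq s "(:",
      PySem.Str.count_eq s ":(", PySem.Str.count_eq s "):"]
  rw [show (":)" : String).toList = [':', ')'] from rfl,
      show ("(:" : String).toList = ['(', ':'] from rfl,
      show (":(" : String).toList = [':', '('] from rfl,
      show ("):" : String).toList = [')', ':'] from rfl]
  rw [pvCount_eq ':' ')' (by decide), pvCount_eq '(' ':' (by decide),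
      pvCount_eq ':' '(' (by decide), pvCount_eq ')' ':' (by decide)]
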